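-- pv_equiv track=rewrite | github.com/shady-cj/Py-algo | DSA/coding_patterns/sliding_window.py | max_sum_of_distinct_subarrays
-- ===== SOURCE A (Python) =====
-- def max_sum_of_distinct_subarrays(nums, k):
--     if k > len(nums) or k <= 0:
--         return 0
--     current_running_sum = 0
--     max_sum = current_running_sum
--     array_map = {}
--     for i in range(len(nums)):
--         array_map[nums[i]] = array_map.get(nums[i], 0) + 1
--         current_running_sum += nums[i]
--         if len(array_map) == k:
--             max_sum = (
--                 current_running_sum
--                 if max_sum is None
--                 else max(current_running_sum, max_sum)
--             )
--         if i >= k - 1: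
--             array_map[nums[i - k + 1]] -= 1
--             current_running_sum -= nums[i - k + 1]
--             if not array_map[nums[i - k + 1]]:
--                 del array_map[nums[i - k + 1]]
--
--     return max_sum
-- ===== SOURCE B (Python) =====
-- def max_sum_of_distinct_subarrays(nums, k):
--     if k > len(nums) or k <= 0:
--         return 0
--     best = 0
--     for j in range(len(nums) - k + 1):
--         w = nums[j:j+k]
--         if len(set(w)) == k:
--             best = max(best, sum(w))
--     return best
-- ===== Notes on version B (the rewrite author's own statement) =====
-- stated objective: simpler
-- what changed: Replaces the incremental sliding-window state (running sum + count dict with insert/decrement/delete) by a plain enumeration of window starts, re-checking distinctness with set() and re-summing each slice independently.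
import Mathlib
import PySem

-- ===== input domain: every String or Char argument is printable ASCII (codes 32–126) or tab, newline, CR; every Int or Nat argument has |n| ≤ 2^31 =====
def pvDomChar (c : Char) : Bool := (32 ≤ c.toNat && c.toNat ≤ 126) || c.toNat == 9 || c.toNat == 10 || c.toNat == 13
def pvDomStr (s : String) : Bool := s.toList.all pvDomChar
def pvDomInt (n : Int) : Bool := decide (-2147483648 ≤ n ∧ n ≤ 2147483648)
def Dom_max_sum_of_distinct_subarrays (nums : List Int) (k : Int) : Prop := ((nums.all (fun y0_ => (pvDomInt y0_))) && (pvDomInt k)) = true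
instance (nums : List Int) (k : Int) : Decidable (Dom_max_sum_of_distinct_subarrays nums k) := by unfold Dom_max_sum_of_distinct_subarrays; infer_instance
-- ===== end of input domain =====

-- B replaces A's incremental sliding-window state (running sum + count dict) by a plain
-- enumeration of window starts that re-checks and re-sums each slice; objective: simpler.

-- ===== PORT A =====
-- A-side helper: the body of A's `for i in range(len(nums))` loop, state = (running sum, max sum, count dict)
def pvStepA (nums : List Int) (k : Int) (st : Int × Int × PySem.Dict Int Int) (i : Int) :
    Int × Int × PySem.Dict Int Int :=
  let x := PySem.List.pyGetD nums i 0          -- nums[i]; i is always in range here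
  let d1 := st.2.2.insert x (st.2.2.getD x 0 + 1)
  let s1 := st.1 + x
  -- `max_sum is None` is never true (max_sum starts at 0), so the update is plain max
  let m1 := if ((d1.size : Int) == k) then max s1 st.2.1 else st.2.1
  if i ≥ k - 1 then
    let y := PySem.List.pyGetD nums (i - k + 1) 0   -- nums[i-k+1]; in range here
    let d2 := d1.insert y (d1.getD y 0 - 1)
    let s2 := s1 - y
    -- `array_map[y]` is present here (its count was ≥ 1 before the decrement)
    let d3 := if d2.getD y 0 == 0 then d2.erase y else d2
    (s2, m1, d3)
  else (s1, m1, d1)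

def max_sum_of_distinct_subarrays (nums : List Int) (k : Int) : Int :=
  if k > (nums.length : Int) ∨ k ≤ 0 then 0
  else
    ((PySem.List.pyRange 0 (nums.length : Int) 1).foldl (pvStepA nums k)
      (0, 0, PySem.Dict.empty)).2.1

-- ===== PORT B =====
-- B-side helper: the body of B's `for j in range(len(nums) - k + 1)` loop
def pvStepB (nums : List Int) (k : Int) (best j : Int) : Int :=
  let w := PySem.List.slice nums (some j) (some (j + k))
  if (((PySem.Set.ofList w).length : Int) == k) then max best w.sum else best

def max_sum_of_distinct_subarrays_alt (nums : List Int) (k : Int) : Int :=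
  if k > (nums.length : Int) ∨ k ≤ 0 then 0
  else
    (PySem.List.pyRange 0 ((nums.length : Int) - k + 1) 1).foldl (pvStepB nums k) 0

-- ===== PRECONDITION & SPEC =====
def Spec_max_sum_of_distinct_subarrays (nums : List Int) (k : Int) (out : Int) : Prop := out = max_sum_of_distinct_subarrays_alt nums k
instance (nums : List Int) (k : Int) (out : Int) : Decidable (Spec_max_sum_of_distinct_subarrays nums k out) := by unfold Spec_max_sum_of_distinct_subarrays; infer_instance

-- ===== CLAIM (what is proved, stated in full; the proofs are below) =====
def Claim_equal_max_sum_of_distinct_subarrays : Prop := ∀ (nums : List Int) (k : Int), Dom_max_sum_of_distinct_subarrays nums k → Spec_max_sum_of_distinct_subarrays nums k (max_sum_of_distinct_subarrays nums k)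

-- ===== LEMMAS AND PROOFS =====

-- The dict `d` represents the multiset of the current window `w`
def pvP (d : PySem.Dict Int Int) (w : List Int) : Prop :=
  d.keys.Nodup ∧ (∀ v, d.getD v 0 = (w.count v : Int)) ∧ (∀ v, v ∈ d.keys → v ∈ w)

-- ---- erase lemmas (PySem.Dict.erase is items.filter) ----
theorem pv_find?_filter_ne {ν : Type} (l : List (Int × ν)) (j k : Int) (h : j ≠ k) :
    (l.filter (fun p => !(p.1 == k))).find? (fun p => p.1 == j) = l.find? (fun p => p.1 == j) := by
  induction l with
  | nil => rfl
  | cons p t ih =>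
    by_cases hj : p.1 = j
    · subst hj
      have hk : (p.1 == k) = false := by simp [h]
      simp [hk]
    · by_cases hk : p.1 = k
      · have hkj : (k == j) = false := by simp [Ne.symm h]
        simp [hk, hkj, ih]
      · simp [hj, hk, ih]

theorem pv_get?_erase {ν : Type} (d : PySem.Dict Int ν) (k j : Int) :
    (d.erase k).get? j = if j = k then none else d.get? j := by
  by_cases h : j = k
  · subst h
    simp only [PySem.Dict.erase, PySem.Dict.get?]
    rw [List.find?_eq_none.2]
    · rfl
    · intro p hp
      simp only [List.mem_filter] at hp
      simpa using hp.2
  · simp only [PySem.Dict.erase, PySem.Dict.get?, if_neg h]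
    rw [pv_find?_filter_ne _ _ _ h]

theorem pv_keys_erase_nodup {ν : Type} (d : PySem.Dict Int ν) (k : Int)
    (h : d.keys.Nodup) : (d.erase k).keys.Nodup := by
  simp only [PySem.Dict.erase, PySem.Dict.keys] at *
  exact ((List.filter_sublist).map _).nodup h

theorem pv_mem_keys_erase {ν : Type} (d : PySem.Dict Int ν) (k v : Int)
    (h : v ∈ (d.erase k).keys) : v ∈ d.keys ∧ v ≠ k := by
  simp only [PySem.Dict.erase, PySem.Dict.keys, List.mem_map] at *
  obtain ⟨p, hp, hv⟩ := h
  rw [List.mem_filter] at hp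
  refine ⟨⟨p, hp.1, hv⟩, ?_⟩
  have := hp.2
  subst hv
  simpa using this

-- ---- size of the dict = number of distinct elements of the window ----
theorem pv_size_eq (d : PySem.Dict Int Int) (w : List Int) (hP : pvP d w) :
    d.size = (PySem.Set.ofList w).length := by
  obtain ⟨hnd, hcnt, hmem⟩ := hP
  have hkeys : ∀ v, v ∈ d.keys ↔ v ∈ PySem.Set.ofList w := by
    intro v
    rw [PySem.Set.mem_ofList]
    constructor
    · exact hmem v
    · intro hv
      by_contra hnv
      have hc : d.contains v = false := by
        rw [← Bool.not_eq_true, PySem.Dict.contains_iff_mem_keys]; exact hnv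
      have := hcnt v
      rw [PySem.Dict.getD_of_not_contains d 0 hc] at this
      have : w.count v = 0 := by omega
      exact absurd ((List.count_pos_iff).2 hv) (by omega)
  have hperm : d.keys.Perm (PySem.Set.ofList w) :=
    (List.perm_ext_iff_of_nodup hnd (PySem.Set.nodup_ofList w)).2 hkeys
  have : d.keys.length = (PySem.Set.ofList w).length := hperm.length_eq
  simpa [PySem.Dict.size, PySem.Dict.keys] using this

-- ---- the main loop invariant ----
theorem pv_inv (nums : List Int) (K : Nat) (hK : 0 < K) (hKn : K ≤ nums.length) :
    ∀ i : Nat, i ≤ nums.length →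
    ∃ d, (PySem.List.pyRange 0 (i : Int) 1).foldl (pvStepA nums (K : Int)) (0, 0, PySem.Dict.empty)
        = (((nums.take i).drop (i - (K - 1))).sum,
           (PySem.List.pyRange 0 ((i : Int) - (K : Int) + 1) 1).foldl (pvStepB nums (K : Int)) 0,
           d)
      ∧ pvP d ((nums.take i).drop (i - (K - 1))) := by
  intro i
  induction i with
  | zero =>
    intro _
    refine ⟨PySem.Dict.empty, ?_, ?_, ?_, ?_⟩
    · rw [PySem.List.pyRange_one_eq_nil (by norm_num),
          PySem.List.pyRange_one_eq_nil (by push_cast; omega)]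
      simp
    · exact PySem.Dict.nodup_keys_empty
    · intro v; simp [PySem.Dict.getD_empty]
    · intro v hv; simp [PySem.Dict.keys, PySem.Dict.empty] at hv
  | succ i ih =>
    intro hi1
    have hi : i < nums.length := by omega
    obtain ⟨d, hfold, hnd, hcnt, hmem⟩ := ih (by omega)
    set w := (nums.take i).drop (i - (K - 1)) with hw
    have hx : PySem.List.pyGetD nums ((i : Nat) : Int) 0 = nums[i] := by
      rw [PySem.List.pyGetD_natCast]; exact List.getD_eq_getElem _ _ hi
    set x := nums[i] with hxv
    have hW' : (nums.take (i+1)).drop (i - (K - 1)) = w ++ [x] := by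
      rw [List.take_add_one, List.getElem?_eq_getElem hi,
          List.drop_append_of_le_length (by simp; omega)]
      simp [hw, hxv]
    have hr : PySem.List.pyRange 0 (((i+1 : Nat)) : Int) 1
        = PySem.List.pyRange 0 ((i : Nat) : Int) 1 ++ [((i : Nat) : Int)] := by
      push_cast
      exact PySem.List.pyRange_one_succ_right (by positivity)
    rw [hr, List.foldl_append, hfold]
    simp only [List.foldl_cons, List.foldl_nil]
    set d1 := d.insert x (d.getD x 0 + 1) with hd1
    have hnd1 : d1.keys.Nodup := PySem.Dict.nodup_keys_insert _ _ _ hnd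
    have hcnt1 : ∀ v, d1.getD v 0 = ((w ++ [x]).count v : Int) := by
      intro v
      rw [hd1, PySem.Dict.getD_insert, List.count_append]
      by_cases hv : v = x
      · subst hv; simp [hcnt]
      · rw [if_neg hv, hcnt v]
        have : List.count v [x] = 0 := by
          simp [Ne.symm hv]
        rw [this]; push_cast; ring
    have hmem1 : ∀ v, v ∈ d1.keys → v ∈ w ++ [x] := by
      intro v hv
      rcases (PySem.Dict.mem_keys_insert _ _ _ _).1 hv with h | h
      · simp [h]
      · exact List.mem_append_left _ (hmem v h)
    have hsize1 : d1.size = (PySem.Set.ofList (w ++ [x])).length :=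
      pv_size_eq _ _ ⟨hnd1, hcnt1, hmem1⟩
    by_cases hcase : K ≤ i + 1
    · -- the window has reached size k: slide it
      set j := i + 1 - K with hj
      have hiK : i - (K - 1) = j := by omega
      have hjlen : j < nums.length := by omega
      have hw'_eq : w ++ [x] = (nums.drop j).take K := by
        rw [← hW', hiK, List.drop_take, show i + 1 - j = K by omega]
      set rest := (nums.take (i+1)).drop ((i+1) - (K - 1)) with hrestdef
      have hrest : rest = (nums.drop (j+1)).take (K-1) := by
        rw [hrestdef, show (i+1) - (K-1) = j + 1 by omega, List.drop_take,
            show (i+1) - (j+1) = K - 1 by omega]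
      have hcons : w ++ [x] = nums[j] :: rest := by
        obtain ⟨m, hKm⟩ : ∃ m, K = m + 1 := ⟨K - 1, by omega⟩
        rw [hw'_eq, hrest, List.drop_eq_getElem_cons hjlen, hKm,
            show m + 1 - 1 = m by omega, List.take_succ_cons]
      set y := nums[j] with hyv
      have hycast : ((i : Nat) : Int) - (K : Int) + 1 = ((j : Nat) : Int) := by omega
      have hy : PySem.List.pyGetD nums (((i : Nat) : Int) - (K : Int) + 1) 0 = y := by
        rw [hycast, PySem.List.pyGetD_natCast]
        exact List.getD_eq_getElem _ _ hjlen
      set d2 := d1.insert y (d1.getD y 0 - 1) with hd2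
      have hcnt2 : ∀ v, d2.getD v 0 = (rest.count v : Int) := by
        intro v
        have hcv : (w ++ [x]).count v = (y :: rest).count v := by rw [hcons]
        rw [hd2, PySem.Dict.getD_insert]
        by_cases hv : v = y
        · subst hv
          rw [if_pos rfl, hcnt1 y, hcv, List.count_cons_self]
          push_cast; ring
        · rw [if_neg hv, hcnt1 v, hcv, List.count_cons,
              if_neg (by simpa using Ne.symm hv)]
          push_cast; ring
      have hnd2 : d2.keys.Nodup := PySem.Dict.nodup_keys_insert _ _ _ hnd1
      have hmem2 : ∀ v, v ∈ d2.keys → v ∈ y :: rest := by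
        intro v hv
        rcases (PySem.Dict.mem_keys_insert _ _ _ _).1 hv with h | h
        · simp [h]
        · rw [← hcons]; exact hmem1 v h
      set d3 := if d2.getD y 0 == 0 then d2.erase y else d2 with hd3
      have hPd3 : pvP d3 rest := by
        rw [hd3]
        split_ifs with hz
        · have hzc : rest.count y = 0 := by
            have h1 := hcnt2 y
            rw [beq_iff_eq] at hz
            omega
          refine ⟨pv_keys_erase_nodup _ _ hnd2, ?_, ?_⟩
          · intro v
            rw [PySem.Dict.getD_eq_get?_getD, pv_get?_erase]
            split_ifs with hv
            · subst hv; simp [hzc]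
            · rw [← PySem.Dict.getD_eq_get?_getD]; exact hcnt2 v
          · intro v hv
            obtain ⟨hv2, hvy⟩ := pv_mem_keys_erase _ _ _ hv
            rcases List.mem_cons.1 (hmem2 v hv2) with h | h
            · exact absurd h hvy
            · exact h
        · refine ⟨hnd2, hcnt2, ?_⟩
          intro v hv
          rcases List.mem_cons.1 (hmem2 v hv) with h | h
          · subst h
            have h1 := hcnt2 y
            have : rest.count y ≠ 0 := by
              intro h0
              rw [h0] at h1
              simp only [beq_iff_eq] at hz
              exact hz (by omega)
            exact List.count_pos_iff.1 (by omega)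
          · exact h
      -- the B-side range gains exactly the new window start j
      have hrM : PySem.List.pyRange 0 ((((i+1) : Nat) : Int) - (K : Int) + 1) 1
          = PySem.List.pyRange 0 (((i : Nat) : Int) - (K : Int) + 1) 1 ++ [((j : Nat) : Int)] := by
        rw [show (((i+1) : Nat) : Int) - (K : Int) + 1 = ((((i : Nat) : Int) - (K : Int) + 1) + 1) by push_cast; ring,
            PySem.List.pyRange_one_succ_right (by omega), hycast]
      refine ⟨d3, ?_, hPd3⟩
      simp only [pvStepA, hx, hy, if_pos (show ((i : Nat) : Int) ≥ (K : Int) - 1 by omega)]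
      rw [hrM, List.foldl_append]
      simp only [List.foldl_cons, List.foldl_nil, Prod.mk.injEq]
      refine ⟨?_, ?_, rfl⟩
      · have hsum := congrArg List.sum hcons
        simp only [List.sum_append, List.sum_cons, List.sum_nil] at hsum
        omega
      · simp only [pvStepB]
        rw [PySem.List.slice_natCast_add, ← hd1, hsize1, hw'_eq]
        have hsx : (w ++ [x]).sum = w.sum + x := by simp
        by_cases hc : ((((PySem.Set.ofList ((nums.drop j).take K)).length : Nat) : Int) == (K : Int)) = true
        · rw [if_pos hc, if_pos hc, ← hw'_eq, hsx, max_comm]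
        · rw [if_neg hc, if_neg hc]
    · -- the window is still growing: no removal, size below k
      have hbf : ¬ ((i : Nat) : Int) ≥ (K : Int) - 1 := by omega
      have h0 : i - (K - 1) = 0 := by omega
      have h0' : (i + 1) - (K - 1) = 0 := by omega
      have htake : nums.take (i+1) = w ++ [x] := by rw [← hW', h0, List.drop_zero]
      have hlen : (w ++ [x]).length = i + 1 := by
        rw [← htake, List.length_take]
        omega
      have hsub : (PySem.Set.ofList (w ++ [x])).length ≤ i + 1 := by
        rw [← hlen]
        exact (List.subperm_of_subset (PySem.Set.nodup_ofList _)
          (fun a ha => (PySem.Set.mem_ofList _ _).1 ha)).length_le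
      have hcondf : (((d1.size : Int)) == (K : Int)) = false := by
        rw [hsize1]
        simp only [beq_eq_false_iff_ne, ne_eq, Nat.cast_inj]
        omega
      have hM1 : PySem.List.pyRange 0 (((i : Nat) : Int) - (K : Int) + 1) 1 = [] :=
        PySem.List.pyRange_one_eq_nil (by omega)
      have hM2 : PySem.List.pyRange 0 ((((i+1) : Nat) : Int) - (K : Int) + 1) 1 = [] :=
        PySem.List.pyRange_one_eq_nil (by push_cast; omega)
      refine ⟨d1, ?_, hnd1, ?_, ?_⟩
      · simp only [pvStepA, hx, if_neg hbf]
        rw [← hd1, hcondf]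
        simp only [Bool.false_eq_true, if_false]
        rw [hM1, hM2]
        simp only [List.foldl_nil, Prod.mk.injEq]
        rw [h0', List.drop_zero, htake]
        simp
      · rw [h0', List.drop_zero, htake]; exact hcnt1
      · rw [h0', List.drop_zero, htake]; exact hmem1

-- ===== VERDICT (by name: the statement is the Claim_ definition above) =====
theorem max_sum_of_distinct_subarrays_spec : Claim_equal_max_sum_of_distinct_subarrays := by
  intro nums k _
  unfold Spec_max_sum_of_distinct_subarrays
  unfold max_sum_of_distinct_subarrays max_sum_of_distinct_subarrays_alt
  by_cases hg : k > (nums.length : Int) ∨ k ≤ 0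
  · simp [hg]
  · simp only [if_neg hg]
    rw [not_or, not_lt, not_le] at hg
    obtain ⟨hk1, hk2⟩ := hg
    set K := k.toNat with hKdef
    have hkK : k = (K : Int) := by omega
    have hK : 0 < K := by omega
    have hKn : K ≤ nums.length := by omega
    obtain ⟨d, hfold, -⟩ := pv_inv nums K hK hKn nums.length le_rfl
    rw [hkK, hfold]
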